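-- pv_equiv track=rewrite | github.com/kyowon1108/david | Thanks/que1/door_hacking_optimized.py | generate_password_batch
-- ===== SOURCE A (Python) =====
-- from itertools import product
--
-- def generate_password_batch(start_index, batch_size, chars):
--     """특정 범위의 암호 배치를 생성합니다."""
--     passwords = []
--     count = 0
--
--     for password_tuple in product(chars, repeat=6):
--         if count >= start_index:
--             password = ''.join(password_tuple)
--             passwords.append(password)
--
--             if len(passwords) >= batch_size:
--                 break
--         count += 1
--
--     return passwords
-- ===== SOURCE B (Python) =====
-- def generate_password_batch(start_index, batch_size, chars):
--     """특정 범위의 암호 배치를 생성합니다."""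
--     n = len(chars)
--     total = n ** 6
--     lo = max(start_index, 0)
--     hi = min(lo + max(batch_size, 0), total)
--     passwords = []
--     for i in range(lo, hi):
--         j = i
--         digits = []
--         for _ in range(6):
--             j, r = divmod(j, n)
--             digits.append(chars[r])
--         passwords.append(''.join(reversed(digits)))
--     return passwords
-- ===== Notes on version B (the rewrite author's own statement) =====
-- stated objective: alternative
-- what changed: Instead of enumerating all length-6 tuples from index 0 and counting past the first start_index of them, B computes the wanted index window [max(start_index,0), min(lo+max(batch_size,0), n^6)) and decodes each index directly to its password by base-n divmod arithmetic, so the skipped prefix is never generated.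
-- intended difference: When batch_size <= 0 and at least one password at or after position max(start_index,0) exists, A still returns one password because its size check runs only after an append, while B returns the empty list, which is the intended meaning of a non-positive batch size. — e.g. on generate_password_batch(0, 0, "a"): A returns ["aaaaaa"], B returns []
import Mathlib
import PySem

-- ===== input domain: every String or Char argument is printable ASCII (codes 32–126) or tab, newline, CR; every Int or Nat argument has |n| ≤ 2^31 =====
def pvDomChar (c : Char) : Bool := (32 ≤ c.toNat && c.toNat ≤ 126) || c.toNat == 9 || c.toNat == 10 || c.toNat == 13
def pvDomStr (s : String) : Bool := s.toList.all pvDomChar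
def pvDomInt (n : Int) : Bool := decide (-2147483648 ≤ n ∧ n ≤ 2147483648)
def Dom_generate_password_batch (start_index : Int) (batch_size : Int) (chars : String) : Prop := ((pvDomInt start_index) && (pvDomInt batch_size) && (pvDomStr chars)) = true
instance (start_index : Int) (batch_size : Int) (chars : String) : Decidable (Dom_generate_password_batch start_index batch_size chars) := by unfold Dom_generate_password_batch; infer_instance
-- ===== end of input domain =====

-- B replaces A's enumerate-and-skip scan over all 6-tuples by direct base-n decoding of the
-- index window, so the skipped prefix is never generated (alternative algorithm).

-- ===== PORT A =====
-- itertools.product(chars, repeat=6), in lexicographic order (standard recursive product)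
def pvProdK (cs : List Char) : Nat → List (List Char)
  | 0 => [[]]
  | k+1 => cs.flatMap (fun a => (pvProdK cs k).map (fun t => a :: t))

-- A's for-loop with its counter, append and break, as structural recursion over the tuple list
def pvLoopA (startI batch : Int) : List (List Char) → Int → List String → List String
  | [], _, acc => acc
  | t :: rest, count, acc =>
    if startI ≤ count then
      let acc' := acc ++ [String.ofList t]
      if batch ≤ (acc'.length : Int) then acc'
      else pvLoopA startI batch rest (count + 1) acc'
    else pvLoopA startI batch rest (count + 1) acc

def generate_password_batch (start_index : Int) (batch_size : Int) (chars : String) : List String :=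
  pvLoopA start_index batch_size (pvProdK chars.toList 6) 0 []

-- ===== PORT B =====
-- Source B's inner loop: 6 × divmod, appending chars[r] (least-significant digit first)
def pvDecodeB (chars : String) (n : Int) : Nat → Int → List Char
  | 0, _ => []
  | k+1, j =>
    ((PySem.Str.pyGet? chars (PySem.Int.mod j n)).getD 'A') ::
      pvDecodeB chars n k (PySem.Int.floordiv j n)

def generate_password_batch_alt (start_index : Int) (batch_size : Int) (chars : String) : List String :=
  let n : Int := PySem.Str.len chars
  let total : Int := n ^ 6
  let lo : Int := max start_index 0
  let hi : Int := min (lo + max batch_size 0) total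
  (PySem.List.pyRange lo hi 1).map (fun i => String.ofList ((pvDecodeB chars n 6 i).reverse))

-- ===== PRECONDITION & SPEC =====
-- When batch_size ≤ 0 and a password at or after position max(start_index,0) exists, A still
-- returns one password (its size check runs only after an append); B returns [], the intended
-- meaning of a non-positive batch size.
def D_generate_password_batch (start_index : Int) (batch_size : Int) (chars : String) : Prop :=
  batch_size ≤ 0 ∧ 0 < chars.toList.length ∧ max start_index 0 < (chars.toList.length : Int) ^ 6
instance (start_index : Int) (batch_size : Int) (chars : String) : Decidable (D_generate_password_batch start_index batch_size chars) := by unfold D_generate_password_batch; infer_instance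

def Spec_generate_password_batch (start_index : Int) (batch_size : Int) (chars : String) (out : List String) : Prop := ¬ D_generate_password_batch start_index batch_size chars → out = generate_password_batch_alt start_index batch_size chars
instance (start_index : Int) (batch_size : Int) (chars : String) (out : List String) : Decidable (Spec_generate_password_batch start_index batch_size chars out) := by unfold Spec_generate_password_batch; infer_instance

def pvDiffWitness_generate_password_batch : Int × Int × String := (0, 0, "a")
def pvDiffWitnessOut_generate_password_batch : (List String) × (List String) := (["aaaaaa"], [])

-- ===== CLAIM (what is proved, stated in full; the proofs are below) =====
def Claim_unchanged_generate_password_batch : Prop := ∀ (start_index : Int) (batch_size : Int) (chars : String), Dom_generate_password_batch start_index batch_size chars → Spec_generate_password_batch start_index batch_size chars (generate_password_batch start_index batch_size chars)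
def Claim_changed_generate_password_batch : Prop := Dom_generate_password_batch (pvDiffWitness_generate_password_batch.1) (pvDiffWitness_generate_password_batch.2.1) (pvDiffWitness_generate_password_batch.2.2) ∧ D_generate_password_batch (pvDiffWitness_generate_password_batch.1) (pvDiffWitness_generate_password_batch.2.1) (pvDiffWitness_generate_password_batch.2.2) ∧ generate_password_batch (pvDiffWitness_generate_password_batch.1) (pvDiffWitness_generate_password_batch.2.1) (pvDiffWitness_generate_password_batch.2.2) = pvDiffWitnessOut_generate_password_batch.1 ∧ generate_password_batch_alt (pvDiffWitness_generate_password_batch.1) (pvDiffWitness_generate_password_batch.2.1) (pvDiffWitness_generate_password_batch.2.2) = pvDiffWitnessOut_generate_password_batch.2 ∧ pvDiffWitnessOut_generate_password_batch.1 ≠ pvDiffWitnessOut_generate_password_batch.2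
def Claim_exact_generate_password_batch : Prop := ∀ (start_index : Int) (batch_size : Int) (chars : String), Dom_generate_password_batch start_index batch_size chars → D_generate_password_batch start_index batch_size chars → generate_password_batch start_index batch_size chars ≠ generate_password_batch_alt start_index batch_size chars

-- ===== LEMMAS AND PROOFS =====

-- A's loop, characterised: acc ++ (slice of length max(batch-|acc|,1) of the tuples from position start-count)
theorem pvLoopA_eq (s b : Int) (ts : List (List Char)) :
    ∀ (count : Int) (acc : List String),
    pvLoopA s b ts count acc =
      acc ++ (((ts.drop (s - count).toNat).take (max (b - acc.length) 1).toNat).map String.ofList) := by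
  induction ts with
  | nil => intro count acc; simp [pvLoopA]
  | cons t rest ih =>
    intro count acc
    by_cases hc : s ≤ count
    · have hd : (s - count).toNat = 0 := by omega
      by_cases hb : b ≤ ((acc.length : Int) + 1)
      · have h1 : (max (b - (acc.length : Int)) 1).toNat = 1 := by omega
        simp [pvLoopA, hc, hb, hd, h1]
      · have h1 : (max (b - (acc.length : Int)) 1).toNat
            = (max (b - ((acc.length : Int) + 1)) 1).toNat + 1 := by omega
        have hd' : (s - (count + 1)).toNat = 0 := by omega
        simp only [pvLoopA, if_pos hc, List.length_append, List.length_singleton]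
        rw [if_neg (by push_cast; omega)]
        rw [ih (count + 1) (acc ++ [String.ofList t])]
        simp [hd, hd', h1, List.take_succ_cons]
    · have h1 : (s - count).toNat = (s - (count + 1)).toNat + 1 := by omega
      simp only [pvLoopA, if_neg hc]
      rw [ih (count + 1) acc, h1]
      simp

theorem pv_map_getD_range {α : Type} (xs : List α) (d : α) :
    (List.range xs.length).map (fun i => xs.getD i d) = xs := by
  induction xs with
  | nil => simp
  | cons a xs ih =>
    simp only [List.length_cons, List.range_succ_eq_map, List.map_cons, List.map_map]
    refine congrArg₂ List.cons rfl ?_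
    conv_rhs => rw [← ih]
    apply List.map_congr_left
    intro i _
    simp [Function.comp]

theorem pv_range_mul_map {α : Type} (n m : Nat) (f : Nat → α) :
    (List.range (n * m)).map f
      = (List.range n).flatMap (fun a => (List.range m).map (fun b => f (a * m + b))) := by
  induction n with
  | zero => simp
  | succ n ih =>
    have hnm : (n + 1) * m = n * m + m := by ring
    rw [hnm, List.range_add, List.map_append, ih, List.range_succ, List.flatMap_append]
    simp [List.map_map, Function.comp]

-- most-significant-first base-N digits, as characters of cs
def pvDec (cs : List Char) : Nat → Nat → List Char
  | 0, _ => []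
  | k+1, i => cs.getD (i / cs.length ^ k) 'A' :: pvDec cs k (i % cs.length ^ k)

theorem pv_flatMap_getD {α : Type} (xs : List Char) (d : Char) (g : Char → List α) :
    xs.flatMap g = (List.range xs.length).flatMap (fun i => g (xs.getD i d)) := by
  conv_lhs => rw [← pv_map_getD_range xs d]
  rw [List.flatMap_map]

theorem pvProdK_eq (cs : List Char) (k : Nat) :
    pvProdK cs k = (List.range (cs.length ^ k)).map (pvDec cs k) := by
  induction k with
  | zero => simp [pvProdK, pvDec, List.range_one]
  | succ k ih =>
    rw [pow_succ']
    rw [pv_range_mul_map cs.length (cs.length ^ k) (pvDec cs (k+1))]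
    show pvProdK cs (k+1) = _
    rw [pvProdK, ih, pv_flatMap_getD cs 'A']
    simp only [List.flatMap_def]
    congr 1
    apply List.map_congr_left
    intro a ha
    rw [List.mem_range] at ha
    have hm : 0 < cs.length ^ k := pow_pos (by omega) k
    rw [List.map_map]
    apply List.map_congr_left
    intro i hi
    rw [List.mem_range] at hi
    have hdiv : (a * cs.length ^ k + i) / cs.length ^ k = a := by
      rw [mul_comm, Nat.mul_add_div hm, Nat.div_eq_of_lt hi]
      omega
    have hmod : (a * cs.length ^ k + i) % cs.length ^ k = i := by
      rw [mul_comm, Nat.mul_add_mod, Nat.mod_eq_of_lt hi]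
    simp [pvDec, hdiv, hmod, Function.comp]

-- peel the LEAST significant digit off pvDec
theorem pvDec_snoc (cs : List Char) (k : Nat) :
    ∀ i : Nat, i < cs.length ^ (k + 1) →
    pvDec cs (k+1) i = pvDec cs k (i / cs.length) ++ [cs.getD (i % cs.length) 'A'] := by
  induction k with
  | zero =>
    intro i hi
    have hi' : i < cs.length := by simpa using hi
    show cs.getD (i / cs.length ^ 0) 'A' :: pvDec cs 0 (i % cs.length ^ 0) = _
    simp [pvDec, Nat.mod_eq_of_lt hi']
  | succ k ih =>
    intro i hi
    have hN : 0 < cs.length := by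
      rcases Nat.eq_zero_or_pos cs.length with h | h
      · rw [h] at hi; simp at hi
      · exact h
    have h1 : i % cs.length ^ (k+1) < cs.length ^ (k+1) := Nat.mod_lt _ (pow_pos hN _)
    have e1 : pvDec cs (k+2) i
        = cs.getD (i / cs.length ^ (k+1)) 'A' :: pvDec cs (k+1) (i % cs.length ^ (k+1)) := rfl
    rw [e1, ih _ h1]
    have e2 : (i % cs.length ^ (k+1)) % cs.length = i % cs.length :=
      Nat.mod_mod_of_dvd _ (dvd_pow_self cs.length (Nat.succ_ne_zero k))
    have e3 : (i % cs.length ^ (k+1)) / cs.length = i / cs.length % cs.length ^ k := by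
      rw [pow_succ', ← Nat.mod_mul_right_div_self i cs.length (cs.length ^ k)]
    have e4 : i / cs.length / cs.length ^ k = i / cs.length ^ (k+1) := by
      rw [Nat.div_div_eq_div_mul, ← pow_succ']
    show _ = cs.getD (i / cs.length / cs.length ^ k) 'A'
            :: pvDec cs k (i / cs.length % cs.length ^ k) ++ _
    rw [e2, e3, e4]
    simp

-- B's digit loop, reversed, is pvDec
theorem pvDecodeB_eq (chars : String) (k : Nat) :
    ∀ i : Nat, 0 < chars.toList.length → i < chars.toList.length ^ k →
    (pvDecodeB chars ((chars.toList.length : Int)) k ((i : Int))).reverse = pvDec chars.toList k i := by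
  induction k with
  | zero => intro i _ _; simp [pvDecodeB, pvDec]
  | succ k ih =>
    intro i hN hi
    have hmod : PySem.Int.mod (i : Int) (chars.toList.length : Int) = ((i % chars.toList.length : Nat) : Int) :=
      PySem.Int.mod_natCast i chars.toList.length
    have hdiv : PySem.Int.floordiv (i : Int) (chars.toList.length : Int) = ((i / chars.toList.length : Nat) : Int) :=
      PySem.Int.floordiv_natCast i chars.toList.length
    have hlt : i % chars.toList.length < chars.toList.length := Nat.mod_lt _ hN
    have hget : (PySem.Str.pyGet? chars ((i % chars.toList.length : Nat) : Int)).getD 'A'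
        = chars.toList.getD (i % chars.toList.length) 'A' := by
      rw [PySem.Str.pyGet?_natCast, List.getD_eq_getElem?_getD]
    have hdivlt : i / chars.toList.length < chars.toList.length ^ k := by
      rw [Nat.div_lt_iff_lt_mul hN, ← pow_succ]
      exact hi
    show ((PySem.Str.pyGet? chars (PySem.Int.mod (i : Int) _)).getD 'A'
        :: pvDecodeB chars _ k (PySem.Int.floordiv (i : Int) _)).reverse = _
    rw [hmod, hdiv, hget, List.reverse_cons, ih _ hN hdivlt, pvDec_snoc chars.toList k i hi]

theorem pv_drop_range_map {α : Type} (g : Nat → α) (lo T : Nat) :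
    ((List.range T).map g).drop lo = (List.range (T - lo)).map (fun k => g (lo + k)) := by
  rcases Nat.le_total lo T with h | h
  · conv_lhs => rw [show T = lo + (T - lo) by omega]
    rw [List.range_add, List.map_append, List.drop_left' (by simp), List.map_map]
    rfl
  · rw [List.drop_eq_nil_of_le (by simpa using h), show T - lo = 0 by omega]
    simp

-- closed forms of the two ports
theorem pvA_closed (s b : Int) (chars : String) :
    generate_password_batch s b chars
      = (List.range (min (max b 1).toNat (chars.toList.length ^ 6 - s.toNat))).map
          (fun k => String.ofList (pvDec chars.toList 6 (s.toNat + k))) := by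
  rw [generate_password_batch, pvLoopA_eq, pvProdK_eq]
  simp only [List.length_nil, Nat.cast_zero, Int.sub_zero, List.nil_append]
  rw [pv_drop_range_map, ← List.map_take, List.take_range, List.map_map]
  rfl

theorem pvB_closed (s b : Int) (chars : String) :
    generate_password_batch_alt s b chars
      = (List.range ((min (max s 0 + max b 0) ((chars.toList.length : Int) ^ 6) - max s 0).toNat)).map
          (fun (k : Nat) => String.ofList ((pvDecodeB chars (chars.toList.length : Int) 6 (max s 0 + (k : Int))).reverse)) := by
  rw [generate_password_batch_alt]
  simp only [PySem.Str.len_eq]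
  rw [PySem.List.pyRange_one, List.map_map]
  rfl

-- ===== VERDICT (by name: the statement is the Claim_ definition above) =====
theorem generate_password_batch_spec : Claim_unchanged_generate_password_batch := by
  intro s b chars _
  unfold Spec_generate_password_batch
  intro hnd
  rw [pvA_closed, pvB_closed]
  set N := chars.toList.length with hNdef
  have hT0 : N = 0 → N ^ 6 = 0 := by intro h; rw [h]; simp
  have hTpos : 0 < N → 0 < N ^ 6 := fun h => pow_pos h 6
  have hcast : ((chars.toList.length : Int)) ^ 6 = ((N ^ 6 : Nat) : Int) := by push_cast; rfl
  have h3 : 1 ≤ b ∨ N = 0 ∨ ((N ^ 6 : Nat) : Int) ≤ max s 0 := by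
    by_contra hcon
    push_neg at hcon
    exact hnd ⟨by omega, by omega, by rw [hcast]; omega⟩
  have hm : min (max b 1).toNat (N ^ 6 - s.toNat)
      = (min (max s 0 + max b 0) ((chars.toList.length : Int) ^ 6) - max s 0).toNat := by
    rw [hcast]; omega
  rw [← hm]
  apply List.map_congr_left
  intro k hk
  rw [List.mem_range] at hk
  have hkT : s.toNat + k < N ^ 6 := by omega
  have hN : 0 < N := by
    by_contra h
    have : N = 0 := by omega
    rw [hT0 this] at hkT; omega
  have hlo : max s 0 + (k : Int) = ((s.toNat + k : Nat) : Int) := by push_cast; omega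
  rw [hlo, pvDecodeB_eq chars 6 (s.toNat + k) hN hkT]

theorem generate_password_batch_changed : Claim_changed_generate_password_batch := by
  unfold Claim_changed_generate_password_batch; decide

theorem generate_password_batch_tight : Claim_exact_generate_password_batch := by
  intro s b chars _ hd
  obtain ⟨hb, hN, hsT⟩ := hd
  rw [pvA_closed, pvB_closed]
  set N := chars.toList.length with hNdef
  have hcast : ((chars.toList.length : Int)) ^ 6 = ((N ^ 6 : Nat) : Int) := by push_cast; rfl
  have hmA : min (max b 1).toNat (N ^ 6 - s.toNat) = 1 := by
    rw [hcast] at hsT; omega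
  have hmB : (min (max s 0 + max b 0) ((chars.toList.length : Int) ^ 6) - max s 0).toNat = 0 := by
    rw [hcast]; rw [hcast] at hsT; omega
  rw [hmA, hmB]
  simp
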